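-- pv_equiv track=rewrite | github.com/BillChan226/HALC | eval/overall_score.py | calculate_accumulative_score
-- ===== SOURCE A (Python) =====
-- def calculate_accumulative_score(data):
--     aggregate_answers = {}
--     for item in data:
--         image_id = item['image_id']
--         answer = item['answer']
--         if image_id not in aggregate_answers:
--             aggregate_answers[image_id] = []
--
--         aggregate_answers[image_id].append(answer)
--
--     return sum(any(answers) for answers in aggregate_answers.values())
-- ===== SOURCE B (Python) =====
-- def calculate_accumulative_score(data):
--     # One pass: keep only the set of image_ids seen with a truthy answer.
--     truthy_ids = set()
--     for item in data:
--         if item['answer']: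
--             truthy_ids.add(item['image_id'])
--     return len(truthy_ids)
-- ===== Notes on version B (the rewrite author's own statement) =====
-- stated objective: simpler
-- what changed: Instead of grouping all answers into a dict of per-image lists and then summing any() over every list in a second pass, B keeps a single set of image_ids that had at least one truthy answer and returns its size.
import Mathlib
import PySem

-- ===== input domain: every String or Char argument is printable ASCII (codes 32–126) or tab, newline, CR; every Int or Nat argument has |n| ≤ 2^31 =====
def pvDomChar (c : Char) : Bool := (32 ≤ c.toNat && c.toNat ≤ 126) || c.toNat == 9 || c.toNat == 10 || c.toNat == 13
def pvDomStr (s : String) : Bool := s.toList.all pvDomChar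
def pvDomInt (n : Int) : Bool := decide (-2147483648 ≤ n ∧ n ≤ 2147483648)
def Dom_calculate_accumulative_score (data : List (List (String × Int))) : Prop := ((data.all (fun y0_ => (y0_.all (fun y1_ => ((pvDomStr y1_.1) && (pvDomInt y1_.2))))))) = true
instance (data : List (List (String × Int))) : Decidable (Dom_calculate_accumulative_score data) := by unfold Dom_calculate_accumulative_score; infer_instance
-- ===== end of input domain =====

-- B replaces A's dict of per-image answer lists + second any()-sum pass by one pass that
-- collects the set of image_ids with a truthy answer and returns its size (simpler).


-- ===== PORT A =====
def calculate_accumulative_score (data : List (List (String × Int))) : Int :=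
  ((data.foldl (fun d item =>
    match (PySem.Dict.mk item).get? "image_id", (PySem.Dict.mk item).get? "answer" with
    | some image_id, some answer =>
        -- 'if image_id not in d: d[image_id] = []' then 'd[image_id].append(answer)'
        -- i.e. d[image_id] = d.get(image_id, []) + [answer]
        d.modify image_id [] (fun l => l ++ [answer])
    | _, _ => d   -- Python raises KeyError here; excluded by Pre_
    ) PySem.Dict.empty).values.map
    (fun answers => if answers.any (fun a => a != 0) then (1 : Int) else 0)).sum

-- ===== PORT B =====
def calculate_accumulative_score_alt (data : List (List (String × Int))) : Int :=
  ((data.foldl (fun s item =>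
    match (PySem.Dict.mk item).get? "answer" with
    | some answer =>
        if answer != 0 then
          match (PySem.Dict.mk item).get? "image_id" with
          | some image_id => PySem.Set.add s image_id
          | none => s    -- Python raises KeyError here; excluded by Pre_
        else s
    | none => s          -- Python raises KeyError here; excluded by Pre_
    ) (PySem.Set.empty : PySem.Set Int)).len : Int)

-- ===== PRECONDITION & SPEC =====
-- A raises KeyError when some item lacks the key 'image_id' or 'answer'; Pre_ excludes exactly those inputs.
def Pre_calculate_accumulative_score (data : List (List (String × Int))) : Prop :=
  (data.all (fun item => (PySem.Dict.mk item).contains "image_id" && (PySem.Dict.mk item).contains "answer")) = true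
instance (data : List (List (String × Int))) : Decidable (Pre_calculate_accumulative_score data) := by unfold Pre_calculate_accumulative_score; infer_instance

def pvWitness_calculate_accumulative_score : (List (List (String × Int))) :=
  [[("image_id", 1), ("answer", 1)], [("image_id", 1), ("answer", 0)], [("image_id", 2), ("answer", 0)]]

def Spec_calculate_accumulative_score (data : List (List (String × Int))) (out : Int) : Prop := out = calculate_accumulative_score_alt data
instance (data : List (List (String × Int))) (out : Int) : Decidable (Spec_calculate_accumulative_score data out) := by unfold Spec_calculate_accumulative_score; infer_instance

-- ===== CLAIM (what is proved, stated in full; the proofs are below) =====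
def Claim_equal_calculate_accumulative_score : Prop := ∀ (data : List (List (String × Int))), Dom_calculate_accumulative_score data → Pre_calculate_accumulative_score data → Spec_calculate_accumulative_score data (calculate_accumulative_score data)

-- ===== LEMMAS AND PROOFS =====

-- the (image_id, answer) pair of an item; meaningful under Pre_
def pvPairOf (item : List (String × Int)) : Int × Int :=
  ((PySem.Dict.mk item).getD "image_id" 0, (PySem.Dict.mk item).getD "answer" 0)

theorem pv_foldA (data : List (List (String × Int)))
    (h : Pre_calculate_accumulative_score data) (d : PySem.Dict Int (List Int)) :
    data.foldl (fun d item =>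
      match (PySem.Dict.mk item).get? "image_id", (PySem.Dict.mk item).get? "answer" with
      | some image_id, some answer => d.modify image_id [] (fun l => l ++ [answer])
      | _, _ => d) d
    = (data.map pvPairOf).foldl (fun d p => d.modify p.1 [] (fun l => l ++ [p.2])) d := by
  induction data generalizing d with
  | nil => rfl
  | cons item rest ih =>
    unfold Pre_calculate_accumulative_score at h
    simp only [List.all_cons, Bool.and_eq_true] at h
    obtain ⟨⟨h1, h2⟩, hrest⟩ := h
    rw [PySem.Dict.contains_eq_isSome_get?] at h1 h2
    obtain ⟨v1, hv1⟩ := Option.isSome_iff_exists.mp h1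
    obtain ⟨v2, hv2⟩ := Option.isSome_iff_exists.mp h2
    have g1 : (PySem.Dict.mk item).getD "image_id" 0 = v1 := by
      rw [PySem.Dict.getD_eq_get?_getD, hv1]; rfl
    have g2 : (PySem.Dict.mk item).getD "answer" 0 = v2 := by
      rw [PySem.Dict.getD_eq_get?_getD, hv2]; rfl
    simp only [List.foldl_cons, List.map_cons, hv1, hv2, pvPairOf, g1, g2]
    exact ih hrest _

theorem pv_foldB (data : List (List (String × Int)))
    (h : Pre_calculate_accumulative_score data) (s : PySem.Set Int) :
    data.foldl (fun s item =>
      match (PySem.Dict.mk item).get? "answer" with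
      | some answer =>
          if answer != 0 then
            match (PySem.Dict.mk item).get? "image_id" with
            | some image_id => PySem.Set.add s image_id
            | none => s
          else s
      | none => s) s
    = (((data.map pvPairOf).filter (fun p => p.2 != 0)).map Prod.fst).foldl PySem.Set.add s := by
  induction data generalizing s with
  | nil => rfl
  | cons item rest ih =>
    unfold Pre_calculate_accumulative_score at h
    simp only [List.all_cons, Bool.and_eq_true] at h
    obtain ⟨⟨h1, h2⟩, hrest⟩ := h
    rw [PySem.Dict.contains_eq_isSome_get?] at h1 h2
    obtain ⟨v1, hv1⟩ := Option.isSome_iff_exists.mp h1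
    obtain ⟨v2, hv2⟩ := Option.isSome_iff_exists.mp h2
    have g1 : (PySem.Dict.mk item).getD "image_id" 0 = v1 := by
      rw [PySem.Dict.getD_eq_get?_getD, hv1]; rfl
    have g2 : (PySem.Dict.mk item).getD "answer" 0 = v2 := by
      rw [PySem.Dict.getD_eq_get?_getD, hv2]; rfl
    simp only [List.foldl_cons, List.map_cons, hv1, hv2, pvPairOf, g1, g2, List.filter_cons]
    by_cases hz : v2 != 0
    · simp only [hz, if_true, List.map_cons, List.foldl_cons]
      exact ih hrest _
    · simp only [Bool.not_eq_true] at hz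
      simp only [hz, Bool.false_eq_true, if_false]
      exact ih hrest _

theorem pv_sum_map_ite (l : List Int) (p : Int → Bool) :
    (l.map (fun k => if p k then (1 : Int) else 0)).sum = ((l.filter p).length : Int) := by
  induction l with
  | nil => rfl
  | cons x xs ih =>
    simp only [List.map_cons, List.sum_cons, List.filter_cons, ih]
    by_cases hx : p x
    · simp only [hx, if_true, List.length_cons]
      push_cast
      omega
    · simp [hx]

-- the combinatorial core: summing "has a truthy answer" over the distinct ids equals the
-- number of distinct ids among the truthy pairs
theorem pv_core (pairs : List (Int × Int)) :
    ((PySem.Set.ofList (pairs.map Prod.fst)).map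
        (fun k => if ((pairs.filter (fun p => p.1 == k)).map Prod.snd).any (fun a => a != 0) then (1 : Int) else 0)).sum
      = ((PySem.Set.ofList ((pairs.filter (fun p => p.2 != 0)).map Prod.fst)).length : Int) := by
  have hpred : ∀ k : Int,
      (((pairs.filter (fun p => p.1 == k)).map Prod.snd).any (fun a => a != 0))
        = pairs.any (fun p => p.1 == k && p.2 != 0) := by
    intro k
    induction pairs with
    | nil => rfl
    | cons q qs ih =>
      simp only [List.filter_cons, List.any_cons]
      by_cases hq : q.1 == k
      · simp [hq, ih]
      · simp only [hq, Bool.false_eq_true, if_false, Bool.false_and, Bool.false_or, ih]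
  simp only [hpred, pv_sum_map_ite]
  congr 1
  have hnd1 : ((PySem.Set.ofList (pairs.map Prod.fst)).filter
      (fun k => pairs.any (fun p => p.1 == k && p.2 != 0))).Nodup :=
    (PySem.Set.nodup_ofList _).filter _
  have hnd2 : (PySem.Set.ofList ((pairs.filter (fun p => p.2 != 0)).map Prod.fst)).Nodup :=
    PySem.Set.nodup_ofList _
  apply List.Perm.length_eq
  rw [List.perm_ext_iff_of_nodup hnd1 hnd2]
  intro k
  simp only [List.mem_filter, PySem.Set.mem_ofList, List.mem_map, List.any_eq_true,
    Bool.and_eq_true, beq_iff_eq, bne_iff_ne, ne_eq]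
  constructor
  · rintro ⟨-, p, hp, hpk, hpz⟩
    exact ⟨p, ⟨hp, by simpa using hpz⟩, hpk⟩
  · rintro ⟨p, ⟨hp, hpz⟩, hpk⟩
    exact ⟨⟨p, hp, hpk⟩, p, hp, hpk, by simpa using hpz⟩

-- ===== VERDICT (by name: the statement is the Claim_ definition above) =====
theorem calculate_accumulative_score_spec : Claim_equal_calculate_accumulative_score := by
  intro data _ hpre
  unfold Spec_calculate_accumulative_score calculate_accumulative_score calculate_accumulative_score_alt
  rw [pv_foldA data hpre, pv_foldB data hpre]
  set pairs := data.map pvPairOf with hpairs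
  have hnd : ((pairs.foldl (fun d p => d.modify p.1 [] (fun l => l ++ [p.2])) PySem.Dict.empty)).keys.Nodup := by
    exact PySem.Dict.nodup_keys_foldl_modify_key pairs Prod.fst [] (fun _ p => (fun l => l ++ [p.2])) PySem.Dict.empty PySem.Dict.nodup_keys_empty
  rw [PySem.Dict.values_eq_map_keys _ hnd ([] : List Int)]
  have hkeys : (pairs.foldl (fun d p => d.modify p.1 [] (fun l => l ++ [p.2])) PySem.Dict.empty).keys
      = PySem.Set.ofList (pairs.map Prod.fst) := by
    rw [PySem.Dict.keys_foldl_modify_key (key := Prod.fst)]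
    simp [PySem.Dict.keys_empty]
    rfl
  have hgetD : ∀ k, (pairs.foldl (fun d p => d.modify p.1 [] (fun l => l ++ [p.2])) PySem.Dict.empty).getD k []
      = (pairs.filter (fun p => p.1 == k)).map Prod.snd := by
    intro k
    rw [PySem.Dict.getD_foldl_modify_append]
    simp [PySem.Dict.getD_empty]
  rw [hkeys, List.map_map]
  have hmap : ((PySem.Set.ofList (pairs.map Prod.fst)).map
        ((fun answers => if answers.any (fun a => a != 0) then (1:Int) else 0) ∘
          (fun k => (pairs.foldl (fun d p => d.modify p.1 [] (fun l => l ++ [p.2])) PySem.Dict.empty).getD k [])))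
      = ((PySem.Set.ofList (pairs.map Prod.fst)).map
        (fun k => if ((pairs.filter (fun p => p.1 == k)).map Prod.snd).any (fun a => a != 0) then (1:Int) else 0)) := by
    apply List.map_congr_left
    intro k _
    simp only [Function.comp_apply, hgetD]
  rw [hmap, pv_core]
  rfl
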